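-- pv_equiv track=rewrite | github.com/yhyh4420/gray.chang | 9465.py | solve
-- ===== SOURCE A (Python) =====
-- def solve(n, stickers):
--     if n == 1:
--         return max(stickers[0][0], stickers[1][0])
--     dp = [[0]*n for _ in range(2)]
--     dp[0][0] = stickers[0][0]
--     dp[1][0] = stickers[1][0]
--     dp[0][1] = dp[1][0] + stickers[0][1]
--     dp[1][1] = dp[0][0] + stickers[1][1]
--
--     for i in range(2, n):
--         dp[0][i] = max(dp[1][i-1], dp[1][i-2])+stickers[0][i]
--         dp[1][i] = max(dp[0][i-1], dp[0][i-2]) + stickers[1][i]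
--
--     return max(dp[0][n-1], dp[1][n-1])
-- ===== SOURCE B (Python) =====
-- def solve(n, stickers):
--     # Top-down memoized recursion: f(row, i) = best score of a valid sticker
--     # path ending at cell (row, i).
--     memo = {}
--
--     def f(row, i):
--         if (row, i) in memo:
--             return memo[(row, i)]
--         if i == 0:
--             v = stickers[row][0]
--         elif i == 1:
--             v = f(1 - row, 0) + stickers[row][1]
--         else:
--             v = max(f(1 - row, i - 1), f(1 - row, i - 2)) + stickers[row][i]
--         memo[(row, i)] = v
--         return v
--
--     # warm the memo in chunks so recursion depth stays bounded (Python's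
--     # default recursion limit would be hit for large n otherwise)
--     for j in range(0, n, 500):
--         f(0, j)
--     return max(f(0, n - 1), f(1, n - 1))
-- ===== Notes on version B (the rewrite author's own statement) =====
-- stated objective: alternative
-- what changed: Replaces the bottom-up preallocated 2xn DP table and its special n==1 branch by demand-driven top-down memoized recursion f(row,i) over a dict (warmed in chunks to bound recursion depth), returning max(f(0,n-1), f(1,n-1)).
import Mathlib
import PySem

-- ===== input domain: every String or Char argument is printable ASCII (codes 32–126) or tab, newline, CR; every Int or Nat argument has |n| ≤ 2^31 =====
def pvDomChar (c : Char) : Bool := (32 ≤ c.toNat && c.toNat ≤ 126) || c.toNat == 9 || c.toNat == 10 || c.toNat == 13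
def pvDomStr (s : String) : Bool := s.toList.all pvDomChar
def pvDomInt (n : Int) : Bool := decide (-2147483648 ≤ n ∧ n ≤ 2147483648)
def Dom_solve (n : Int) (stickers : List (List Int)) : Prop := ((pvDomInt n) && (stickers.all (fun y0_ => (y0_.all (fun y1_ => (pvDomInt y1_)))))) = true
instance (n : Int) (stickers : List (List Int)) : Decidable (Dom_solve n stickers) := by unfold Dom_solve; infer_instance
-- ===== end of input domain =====

-- B replaces A's bottom-up preallocated 2×n DP table (and its special n==1 branch) by
-- demand-driven top-down memoized recursion f(row, i) over a dict, answered as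
-- max(f(0, n-1), f(1, n-1)).  Equivalence of return values proved on Pre_solve.

-- ===== PORT A =====
-- the body of A's 'for i in range(2, n)' loop, acting on the state (dp[0], dp[1])
def stepA (stickers : List (List Int)) (st : List Int × List Int) (i : Int) : List Int × List Int :=
  let d0 := PySem.List.pySetD st.1 i
    (max (PySem.List.pyGetD st.2 (i-1) 0) (PySem.List.pyGetD st.2 (i-2) 0)
      + PySem.List.pyGetD (PySem.List.pyGetD stickers 0 []) i 0)
  let d1 := PySem.List.pySetD st.2 i
    (max (PySem.List.pyGetD d0 (i-1) 0) (PySem.List.pyGetD d0 (i-2) 0)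
      + PySem.List.pyGetD (PySem.List.pyGetD stickers 1 []) i 0)
  (d0, d1)

def solve (n : Int) (stickers : List (List Int)) : Int :=
  if n == 1 then
    max (PySem.List.pyGetD (PySem.List.pyGetD stickers 0 []) 0 0)
        (PySem.List.pyGetD (PySem.List.pyGetD stickers 1 []) 0 0)
  else
    -- [0]*n : for n ≤ 0 Python gives [] and so does toNat here
    let dp0 := List.replicate n.toNat (0 : Int)
    let dp1 := List.replicate n.toNat (0 : Int)
    let dp0 := PySem.List.pySetD dp0 0 (PySem.List.pyGetD (PySem.List.pyGetD stickers 0 []) 0 0)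
    let dp1 := PySem.List.pySetD dp1 0 (PySem.List.pyGetD (PySem.List.pyGetD stickers 1 []) 0 0)
    let dp0 := PySem.List.pySetD dp0 1 (PySem.List.pyGetD dp1 0 0 + PySem.List.pyGetD (PySem.List.pyGetD stickers 0 []) 1 0)
    let dp1 := PySem.List.pySetD dp1 1 (PySem.List.pyGetD dp0 0 0 + PySem.List.pyGetD (PySem.List.pyGetD stickers 1 []) 1 0)
    let st := (PySem.List.pyRange 2 n 1).foldl (stepA stickers) (dp0, dp1)
    max (PySem.List.pyGetD st.1 (n-1) 0) (PySem.List.pyGetD st.2 (n-1) 0)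

-- ===== PORT B =====
-- stickers[row][i] (B only reads in-range cells on Pre_ inputs)
def itemB (stickers : List (List Int)) (row : Int) (i : Int) : Int :=
  PySem.List.pyGetD (PySem.List.pyGetD stickers row []) i 0

-- Source B's inner 'def f(row, i)', memo dict threaded explicitly (i first so Lean
-- recursion is structural on it; Python's nonneg i becomes the Nat argument)
def fB (stickers : List (List Int)) : Nat → Int → PySem.Dict (Int × Int) Int →
    PySem.Dict (Int × Int) Int × Int
  | 0, row, memo =>
    match memo.get? (row, (0 : Int)) with
    | some v => (memo, v)
    | none =>
      let v := itemB stickers row 0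
      (memo.insert (row, (0 : Int)) v, v)
  | 1, row, memo =>
    match memo.get? (row, (1 : Int)) with
    | some v => (memo, v)
    | none =>
      let p := fB stickers 0 (1 - row) memo
      let v := p.2 + itemB stickers row 1
      (p.1.insert (row, (1 : Int)) v, v)
  | (k+2), row, memo =>
    match memo.get? (row, ((k : Int) + 2)) with
    | some v => (memo, v)
    | none =>
      let p := fB stickers (k+1) (1 - row) memo
      let q := fB stickers k (1 - row) p.1
      let v := max p.2 q.2 + itemB stickers row ((k : Int) + 2)
      (q.1.insert (row, ((k : Int) + 2)) v, v)

def solve_alt (n : Int) (stickers : List (List Int)) : Int :=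
  -- warm-up loop 'for j in range(0, n, 500): f(0, j)' (only the memo survives it)
  let memo0 := (PySem.List.pyRange 0 n 500).foldl
    (fun m j => (fB stickers j.toNat 0 m).1) PySem.Dict.empty
  let p := fB stickers (n-1).toNat 0 memo0
  let q := fB stickers (n-1).toNat 1 p.1
  max p.2 q.2

-- ===== PRECONDITION & SPEC =====
-- exactly the inputs where A returns (no IndexError): two rows present, n ≥ 1, both rows of length ≥ n
def Pre_solve (n : Int) (stickers : List (List Int)) : Prop :=
  2 ≤ stickers.length ∧ 1 ≤ n ∧ n ≤ ((stickers.getD 0 []).length : Int) ∧ n ≤ ((stickers.getD 1 []).length : Int)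
instance (n : Int) (stickers : List (List Int)) : Decidable (Pre_solve n stickers) := by unfold Pre_solve; infer_instance

def pvWitness_solve : Int × List (List Int) := (3, [[1, 5, 2], [4, 1, 9]])

def Spec_solve (n : Int) (stickers : List (List Int)) (out : Int) : Prop := out = solve_alt n stickers
instance (n : Int) (stickers : List (List Int)) (out : Int) : Decidable (Spec_solve n stickers out) := by unfold Spec_solve; infer_instance

-- ===== CLAIM (what is proved, stated in full; the proofs are below) =====
def Claim_equal_solve : Prop := ∀ (n : Int) (stickers : List (List Int)), Dom_solve n stickers → Pre_solve n stickers → Spec_solve n stickers (solve n stickers)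

-- ===== LEMMAS AND PROOFS =====

-- the mathematical DP columns: G s0 s1 i = (dp0[i], dp1[i])
def G (s0 s1 : List Int) : Nat → Int × Int
  | 0 => (s0.getD 0 0, s1.getD 0 0)
  | 1 => (s1.getD 0 0 + s0.getD 1 0, s0.getD 0 0 + s1.getD 1 0)
  | (k+2) => (max (G s0 s1 (k+1)).2 (G s0 s1 k).2 + s0.getD (k+2) 0,
              max (G s0 s1 (k+1)).1 (G s0 s1 k).1 + s1.getD (k+2) 0)

def gval (s0 s1 : List Int) (row : Int) (i : Nat) : Int :=
  if row = 0 then (G s0 s1 i).1 else (G s0 s1 i).2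

-- memo invariant: every stored entry is the right DP value
def MemoInv (s0 s1 : List Int) (memo : PySem.Dict (Int × Int) Int) : Prop :=
  ∀ k v, memo.get? k = some v → ∃ i : Nat, k.2 = (i : Int) ∧ v = gval s0 s1 k.1 i

theorem memoInv_empty (s0 s1 : List Int) : MemoInv s0 s1 PySem.Dict.empty := by
  intro k v h
  simp [PySem.Dict.get?_empty] at h

theorem memoInv_insert (s0 s1 : List Int) (memo : PySem.Dict (Int × Int) Int)
    (row : Int) (i : Nat) (v : Int) (hInv : MemoInv s0 s1 memo)
    (hv : v = gval s0 s1 row i) :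
    MemoInv s0 s1 (memo.insert (row, (i : Int)) v) := by
  intro k w h
  rw [PySem.Dict.get?_insert] at h
  by_cases hk : k = (row, (i : Int))
  · simp [hk] at h
    exact ⟨i, by simp [hk], by rw [← h, hv, hk]⟩
  · simp [hk] at h
    exact hInv k w h

theorem pyGetD_one'' {α : Type} (xs : List α) (d : α) :
    PySem.List.pyGetD xs 1 d = xs.getD 1 d := by
  simpa using PySem.List.pyGetD_natCast (xs := xs) (n := 1) (d := d)

-- soundness of the memoized recursion
theorem fB_sound (stickers : List (List Int)) (i : Nat) :
    ∀ (row : Int) (memo : PySem.Dict (Int × Int) Int),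
      (row = 0 ∨ row = 1) →
      MemoInv (stickers.getD 0 []) (stickers.getD 1 []) memo →
      MemoInv (stickers.getD 0 []) (stickers.getD 1 []) (fB stickers i row memo).1 ∧
      (fB stickers i row memo).2 = gval (stickers.getD 0 []) (stickers.getD 1 []) row i := by
  induction i using Nat.strong_induction_on with
  | _ i ih =>
    intro row memo hr hInv
    have hflip : (1 - row = 0 ∨ 1 - row = 1) := by omega
    match i with
    | 0 =>
      rw [fB]
      cases hm : memo.get? (row, (0 : Int)) with
      | some v =>
        refine ⟨hInv, ?_⟩
        obtain ⟨j, hj, hv⟩ := hInv _ _ hm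
        have : j = 0 := by omega
        simp [hv, this]
      | none =>
        have hv : itemB stickers row 0 =
            gval (stickers.getD 0 []) (stickers.getD 1 []) row 0 := by
          rcases hr with h | h <;> subst h <;>
            simp [itemB, gval, G, PySem.List.pyGetD_zero, pyGetD_one'']
        exact ⟨memoInv_insert _ _ _ row 0 _ hInv hv, hv⟩
    | 1 =>
      rw [fB]
      cases hm : memo.get? (row, (1 : Int)) with
      | some v =>
        refine ⟨hInv, ?_⟩
        obtain ⟨j, hj, hv⟩ := hInv _ _ hm
        have : j = 1 := by omega
        simp [hv, this]
      | none =>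
        obtain ⟨hInv1, hval1⟩ := ih 0 (by omega) (1 - row) memo hflip hInv
        have hv : (fB stickers 0 (1 - row) memo).2 + itemB stickers row 1 =
            gval (stickers.getD 0 []) (stickers.getD 1 []) row 1 := by
          rw [hval1]
          rcases hr with h | h <;> subst h <;>
            simp [itemB, gval, G, PySem.List.pyGetD_zero, pyGetD_one'']
        exact ⟨memoInv_insert _ _ _ row 1 _ hInv1 hv, hv⟩
    | (k+2) =>
      rw [fB]
      cases hm : memo.get? (row, ((k : Int) + 2)) with
      | some v =>
        refine ⟨hInv, ?_⟩
        obtain ⟨j, hj, hv⟩ := hInv _ _ hm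
        have : j = k + 2 := by omega
        simp [hv, this]
      | none =>
        obtain ⟨hInv1, hval1⟩ := ih (k+1) (by omega) (1 - row) memo hflip hInv
        obtain ⟨hInv2, hval2⟩ := ih k (by omega) (1 - row) _ hflip hInv1
        have hcast : ((k : Int) + 2) = ((k + 2 : Nat) : Int) := by push_cast; ring
        have hv : max (fB stickers (k+1) (1 - row) memo).2
              (fB stickers k (1 - row) (fB stickers (k+1) (1 - row) memo).1).2
              + itemB stickers row ((k : Int) + 2) =
            gval (stickers.getD 0 []) (stickers.getD 1 []) row (k+2) := by
          rw [hval1, hval2]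
          have hitem : itemB stickers row ((k : Int) + 2) =
              (PySem.List.pyGetD stickers row []).getD (k+2) 0 := by
            unfold itemB; rw [hcast, PySem.List.pyGetD_natCast]
          rw [hitem]
          rcases hr with h | h <;> subst h <;>
            simp [gval, G, PySem.List.pyGetD_zero, pyGetD_one'']
        rw [hcast]
        exact ⟨memoInv_insert _ _ _ row (k+2) _ hInv2 hv, hv⟩

-- the warm-up fold only grows a sound memo
theorem warm_inv (stickers : List (List Int)) (js : List Int)
    (memo : PySem.Dict (Int × Int) Int)
    (hInv : MemoInv (stickers.getD 0 []) (stickers.getD 1 []) memo) :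
    MemoInv (stickers.getD 0 []) (stickers.getD 1 [])
      (js.foldl (fun m j => (fB stickers j.toNat 0 m).1) memo) := by
  induction js generalizing memo with
  | nil => exact hInv
  | cons j js ihj =>
    exact ihj _ ((fB_sound stickers j.toNat 0 memo (Or.inl rfl) hInv).1)

-- B computes max((G (n-1)).1, (G (n-1)).2)
theorem solve_alt_eq (n : Int) (stickers : List (List Int)) :
    solve_alt n stickers =
      max (G (stickers.getD 0 []) (stickers.getD 1 []) (n-1).toNat).1
          (G (stickers.getD 0 []) (stickers.getD 1 []) (n-1).toNat).2 := by
  unfold solve_alt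
  have hInv0 := warm_inv stickers (PySem.List.pyRange 0 n 500) PySem.Dict.empty
    (memoInv_empty _ _)
  obtain ⟨hInv1, hval1⟩ := fB_sound stickers (n-1).toNat 0 _ (Or.inl rfl) hInv0
  obtain ⟨_, hval2⟩ := fB_sound stickers (n-1).toNat 1 _ (Or.inr rfl) hInv1
  simp only [hval1, hval2, gval]
  norm_num

-- ===== A side =====

-- proof-only view of A's loop, indexed by the number of completed iterations
def foldA (stickers : List (List Int)) (init : List Int × List Int) (k : Nat) : List Int × List Int :=
  (PySem.List.pyRange 2 (2 + (k:Int)) 1).foldl (stepA stickers) init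

theorem foldA_succ (stickers : List (List Int)) (init : List Int × List Int) (k : Nat) :
    foldA stickers init (k+1) = stepA stickers (foldA stickers init k) (2 + (k:Int)) := by
  unfold foldA
  have h1 : (2:Int) + ((k+1 : Nat) : Int) = (2 + (k:Int)) + 1 := by push_cast; ring
  rw [h1, PySem.List.pyRange_one_succ_right (by omega), List.foldl_append, List.foldl_cons,
    List.foldl_nil]

theorem getD_set_ne {xs : List Int} {i j : Nat} (h : j ≠ i) (v d : Int) :
    (xs.set i v).getD j d = xs.getD j d := by
  simp [List.getD, List.getElem?_set_ne (Ne.symm h)]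

theorem getD_set_self {xs : List Int} {i : Nat} (h : i < xs.length) (v d : Int) :
    (xs.set i v).getD i d = v := by
  simp [List.getD, List.getElem?_set_self (by simpa using h)]

theorem pySetD_zero' (xs : List Int) (v : Int) : PySem.List.pySetD xs 0 v = xs.set 0 v := by
  simpa using PySem.List.pySetD_natCast (xs := xs) (n := 0) (v := v)

theorem pySetD_one' (xs : List Int) (v : Int) : PySem.List.pySetD xs 1 v = xs.set 1 v := by
  simpa using PySem.List.pySetD_natCast (xs := xs) (n := 1) (v := v)

-- loop invariant: after k iterations A's rows hold G at the last two columns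
theorem loop_inv (stickers : List (List Int)) (N : Nat) (hN : 2 ≤ N)
    (init : List Int × List Int) (hi0 : init.1.length = N) (hi1 : init.2.length = N)
    (h00 : init.1.getD 0 0 = (G (stickers.getD 0 []) (stickers.getD 1 []) 0).1)
    (h01 : init.2.getD 0 0 = (G (stickers.getD 0 []) (stickers.getD 1 []) 0).2)
    (h10 : init.1.getD 1 0 = (G (stickers.getD 0 []) (stickers.getD 1 []) 1).1)
    (h11 : init.2.getD 1 0 = (G (stickers.getD 0 []) (stickers.getD 1 []) 1).2)
    (k : Nat) (hk : k ≤ N - 2) :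
    (foldA stickers init k).1.length = N ∧ (foldA stickers init k).2.length = N ∧
    (foldA stickers init k).1.getD (k+1) 0 = (G (stickers.getD 0 []) (stickers.getD 1 []) (k+1)).1 ∧
    (foldA stickers init k).2.getD (k+1) 0 = (G (stickers.getD 0 []) (stickers.getD 1 []) (k+1)).2 ∧
    (foldA stickers init k).1.getD k 0 = (G (stickers.getD 0 []) (stickers.getD 1 []) k).1 ∧
    (foldA stickers init k).2.getD k 0 = (G (stickers.getD 0 []) (stickers.getD 1 []) k).2 := by
  induction k with
  | zero =>
      unfold foldA
      rw [PySem.List.pyRange_one_eq_nil (by norm_num)]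
      exact ⟨hi0, hi1, h10, h11, h00, h01⟩
  | succ k ih =>
      obtain ⟨l0, l1, e1, e2, e3, e4⟩ := ih (by omega)
      rw [foldA_succ]
      have c1 : (2 + (k:Int)) - 1 = ((k+1 : Nat) : Int) := by push_cast; ring
      have c0 : (2 + (k:Int)) - 2 = ((k : Nat) : Int) := by ring
      have c2 : (2 + (k:Int)) = ((k+2 : Nat) : Int) := by push_cast; ring
      simp only [stepA]
      rw [c1, c0, c2]
      simp only [PySem.List.pySetD_natCast, PySem.List.pyGetD_natCast,
        PySem.List.pyGetD_zero, pyGetD_one'']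
      refine ⟨by simpa using l0, by simpa using l1, ?_, ?_, ?_, ?_⟩
      · rw [show k + 1 + 1 = k + 2 from rfl, getD_set_self (by omega) _ _, e2, e4]
        simp [G]
      · rw [show k + 1 + 1 = k + 2 from rfl, getD_set_self (by omega) _ _,
          getD_set_ne (by omega) _ _, getD_set_ne (by omega) _ _, e1, e3]
        simp [G]
      · rw [getD_set_ne (by omega) _ _, e1]
      · rw [getD_set_ne (by omega) _ _, e2]

-- ===== VERDICT (by name: the statement is the Claim_ definition above) =====
theorem solve_spec : Claim_equal_solve := by
  intro n stickers _ hpre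
  obtain ⟨hlen, hn1, hl0, hl1⟩ := hpre
  show solve n stickers = solve_alt n stickers
  rw [solve_alt_eq]
  by_cases h1 : n = 1
  · subst h1
    simp [solve, G, PySem.List.pyGetD_zero, pyGetD_one'']
  · have hb : (n == 1) = false := by simp [h1]
    have hn2 : 2 ≤ n := by omega
    have hN2 : 2 ≤ n.toNat := by omega
    simp only [solve, hb, Bool.false_eq_true, if_false,
      PySem.List.pyGetD_zero, pyGetD_one'', pySetD_zero', pySetD_one']
    set R0 := stickers.getD 0 ([] : List Int) with hR0
    set R1 := stickers.getD 1 ([] : List Int) with hR1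
    have hl0' : n.toNat ≤ R0.length := by omega
    have hl1' : n.toNat ≤ R1.length := by omega
    set INIT : List Int × List Int :=
      (((List.replicate n.toNat (0:Int)).set 0 (R0.getD 0 0)).set 1
          (((List.replicate n.toNat (0:Int)).set 0 (R1.getD 0 0)).getD 0 0 + R0.getD 1 0),
       ((List.replicate n.toNat (0:Int)).set 0 (R1.getD 0 0)).set 1
          ((((List.replicate n.toNat (0:Int)).set 0 (R0.getD 0 0)).set 1
              (((List.replicate n.toNat (0:Int)).set 0 (R1.getD 0 0)).getD 0 0 + R0.getD 1 0)).getD 0 0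
            + R1.getD 1 0)) with hINIT
    have hi0 : INIT.1.length = n.toNat := by simp [hINIT]
    have hi1 : INIT.2.length = n.toNat := by simp [hINIT]
    have s1 : INIT.1.getD 1 0 = R1.getD 0 0 + R0.getD 1 0 := by
      rw [hINIT]
      rw [getD_set_self (by simp; omega) _ _, getD_set_self (by simp; omega) _ _]
    have s2 : INIT.2.getD 1 0 = R0.getD 0 0 + R1.getD 1 0 := by
      rw [hINIT]
      rw [getD_set_self (by simp; omega) _ _,
        getD_set_ne (by omega) _ _, getD_set_self (by simp; omega) _ _]
    have s3 : INIT.1.getD 0 0 = R0.getD 0 0 := by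
      rw [hINIT]
      rw [getD_set_ne (by omega) _ _, getD_set_self (by simp; omega) _ _]
    have s4 : INIT.2.getD 0 0 = R1.getD 0 0 := by
      rw [hINIT]
      rw [getD_set_ne (by omega) _ _, getD_set_self (by simp; omega) _ _]
    have key := loop_inv stickers n.toNat hN2 INIT hi0 hi1
      (by rw [s3, hR0]; simp [G]) (by rw [s4, hR1]; simp [G])
      (by rw [s1, hR0, hR1]; simp [G]) (by rw [s2, hR0, hR1]; simp [G])
      (n.toNat - 2) le_rfl
    obtain ⟨-, -, k1, k2, -, -⟩ := key
    rw [show n.toNat - 2 + 1 = n.toNat - 1 from by omega] at k1 k2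
    simp only [foldA] at k1 k2
    rw [show (2:Int) + ((n.toNat - 2 : Nat) : Int) = n from by omega] at k1 k2
    rw [show n - 1 = ((n.toNat - 1 : Nat) : Int) from by omega]
    simp only [PySem.List.pyGetD_natCast]
    rw [← hINIT] at *
    rw [k1, k2]
    simp [hR0, hR1]
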